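-- pv_equiv track=rewrite | github.com/KEERRO/ctf-writeups | CSAW CTF 2020 QUALS/REV/Blox1/generate_shape.py | gen_second_check
-- ===== SOURCE A (Python) =====
-- arr3 = [0x01,0x02,0x03,0x01,0x07,0x04,0x01,0x01,0x01,0x03,0x07,0x05,0x00,0x00,0x00,0x00,0x00,0x00,0x00,0x00,0x00,0x00,0x00,0x00]
--
-- arr4 = [0x05,0x02,0x03,0x05,0x03,0x02,0x01,0x05,0x01,0x04,0x03,0x04,0x00,0x00,0x00,0x00,0x00,0x00,0x00,0x00,0x00,0x00,0x00,0x00]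
--
-- def gen_second_check(a1,i,test):
-- 		v4 = 0
-- 		v3 = 0
-- 		for j in range(5):
-- 			if (test >> j)%2:
-- 				v4 ^= j + 1
-- 				v3 += 1
-- 		if (arr3[5 * a1 + i] == v4) and (arr4[5 * a1 + i] == v3):
-- 			return 1
-- 		else:
-- 			return 0
-- ===== SOURCE B (Python) =====
-- arr3 = [0x01,0x02,0x03,0x01,0x07,0x04,0x01,0x01,0x01,0x03,0x07,0x05,0x00,0x00,0x00,0x00,0x00,0x00,0x00,0x00,0x00,0x00,0x00,0x00]
--
-- arr4 = [0x05,0x02,0x03,0x05,0x03,0x02,0x01,0x05,0x01,0x04,0x03,0x04,0x00,0x00,0x00,0x00,0x00,0x00,0x00,0x00,0x00,0x00,0x00,0x00]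
--
-- # Precomputed (xor-of-bit-positions-plus-one, popcount) for each 5-bit value.
-- _TABLE = [(0, 0), (1, 1), (2, 1), (3, 2), (3, 1), (2, 2), (1, 2), (0, 3),
--           (4, 1), (5, 2), (6, 2), (7, 3), (7, 2), (6, 3), (5, 3), (4, 4),
--           (5, 1), (4, 2), (7, 2), (6, 3), (6, 2), (7, 3), (4, 3), (5, 4),
--           (1, 2), (0, 3), (3, 3), (2, 4), (2, 3), (3, 4), (0, 4), (1, 5)]
--
-- def gen_second_check(a1, i, test):
--     v4, v3 = _TABLE[test % 32]
--     idx = 5 * a1 + i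
--     return 1 if arr3[idx] == v4 and arr4[idx] == v3 else 0
-- ===== Notes on version B (the rewrite author's own statement) =====
-- stated objective: alternative
-- what changed: B replaces the per-call loop over the five bit positions (shift/test, xor, count) by a single lookup of the precomputed (xor, popcount) pair in a 32-entry table indexed by test % 32.
import Mathlib
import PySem

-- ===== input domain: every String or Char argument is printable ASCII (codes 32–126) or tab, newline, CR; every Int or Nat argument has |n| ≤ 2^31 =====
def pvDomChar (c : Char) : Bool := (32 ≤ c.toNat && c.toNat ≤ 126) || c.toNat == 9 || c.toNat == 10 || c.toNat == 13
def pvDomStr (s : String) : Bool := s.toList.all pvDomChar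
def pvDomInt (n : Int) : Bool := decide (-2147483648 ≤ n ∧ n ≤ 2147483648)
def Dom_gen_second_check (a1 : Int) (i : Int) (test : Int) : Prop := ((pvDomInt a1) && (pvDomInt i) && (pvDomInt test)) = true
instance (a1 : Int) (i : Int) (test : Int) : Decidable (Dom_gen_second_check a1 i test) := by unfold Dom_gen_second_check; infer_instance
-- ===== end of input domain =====

-- B replaces the 5-iteration bit-scan by a single lookup in a precomputed 32-entry
-- (xor, popcount) table indexed by test % 32 (objective: alternative decomposition).


-- ===== PORT A =====
def gsc_arr3 : List Int := [1,2,3,1,7,4,1,1,1,3,7,5,0,0,0,0,0,0,0,0,0,0,0,0]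
def gsc_arr4 : List Int := [5,2,3,5,3,2,1,5,1,4,3,4,0,0,0,0,0,0,0,0,0,0,0,0]

-- the for-loop over range(5): state (v4, v3); `test >> j` is `test >>> j.toNat`,
-- exact since j ∈ range(5) is nonnegative; `% 2` is Python floor mod, `^=` is PySem.Int.bxor
def gsc_loop (test : Int) : Int × Int :=
  (PySem.List.pyRange 0 5 1).foldl
    (fun (p : Int × Int) j =>
      if PySem.Int.mod (test >>> j.toNat) 2 ≠ 0 then (PySem.Int.bxor p.1 (j + 1), p.2 + 1) else p)
    (0, 0)

def gen_second_check (a1 : Int) (i : Int) (test : Int) : Int :=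
  let st := gsc_loop test
  match PySem.List.pyGet? gsc_arr3 (5 * a1 + i), PySem.List.pyGet? gsc_arr4 (5 * a1 + i) with
  | some x, some y => if x = st.1 ∧ y = st.2 then 1 else 0
  | _, _ => 0  -- unreachable under Pre_ (Python raises IndexError there)

-- ===== PORT B =====
def gscB_arr3 : List Int := [1,2,3,1,7,4,1,1,1,3,7,5,0,0,0,0,0,0,0,0,0,0,0,0]
def gscB_arr4 : List Int := [5,2,3,5,3,2,1,5,1,4,3,4,0,0,0,0,0,0,0,0,0,0,0,0]

-- precomputed (xor of set-bit positions + 1, popcount) for each 5-bit value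
def gsc_table : List (Int × Int) :=
  [(0,0),(1,1),(2,1),(3,2),(3,1),(2,2),(1,2),(0,3),
   (4,1),(5,2),(6,2),(7,3),(7,2),(6,3),(5,3),(4,4),
   (5,1),(4,2),(7,2),(6,3),(6,2),(7,3),(4,3),(5,4),
   (1,2),(0,3),(3,3),(2,4),(2,3),(3,4),(0,4),(1,5)]

def gen_second_check_alt (a1 : Int) (i : Int) (test : Int) : Int :=
  -- _TABLE[test % 32]: the index is always in [0,32), so the default is never used
  let p := PySem.List.pyGetD gsc_table (PySem.Int.mod test 32) (0, 0)
  let idx := 5 * a1 + i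
  match PySem.List.pyGet? gscB_arr3 idx with
  | none => 0  -- unreachable under Pre_
  | some x =>
    match PySem.List.pyGet? gscB_arr4 idx with
    | none => 0  -- unreachable under Pre_
    | some y => if x = p.1 ∧ y = p.2 then 1 else 0

-- ===== PRECONDITION & SPEC =====
-- Pre_ excludes exactly the indices where arr3[5*a1+i] raises IndexError in Python
def Pre_gen_second_check (a1 : Int) (i : Int) (test : Int) : Prop :=
  PySem.Raise.InRange 24 (5 * a1 + i)
instance (a1 : Int) (i : Int) (test : Int) : Decidable (Pre_gen_second_check a1 i test) := by
  unfold Pre_gen_second_check; infer_instance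

def pvWitness_gen_second_check : Int × Int × Int := (1, 2, 21)

def Spec_gen_second_check (a1 : Int) (i : Int) (test : Int) (out : Int) : Prop := out = gen_second_check_alt a1 i test
instance (a1 : Int) (i : Int) (test : Int) (out : Int) : Decidable (Spec_gen_second_check a1 i test out) := by unfold Spec_gen_second_check; infer_instance

-- ===== CLAIM (what is proved, stated in full; the proofs are below) =====
def Claim_equal_gen_second_check : Prop := ∀ (a1 : Int) (i : Int) (test : Int), Dom_gen_second_check a1 i test → Pre_gen_second_check a1 i test → Spec_gen_second_check a1 i test (gen_second_check a1 i test)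

-- ===== LEMMAS AND PROOFS =====
-- each of the five bits the loop inspects depends only on test % 32
theorem gsc_bit_congr (test jI : Int) (h0 : 0 ≤ jI) (hj : jI < 5) :
    PySem.Int.mod (test >>> ((Int.toNat jI : Nat) : Int)) 2
      = PySem.Int.mod ((test % 32) >>> ((Int.toNat jI : Nat) : Int)) 2 := by
  rw [Int.shiftRight_natCast_right, Int.shiftRight_natCast_right,
      Int.shiftRight_eq_div_pow, Int.shiftRight_eq_div_pow,
      PySem.Int.mod_eq_emod_of_pos (by norm_num), PySem.Int.mod_eq_emod_of_pos (by norm_num)]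
  interval_cases jI <;> (first | omega | (norm_num [Int.toNat]; omega) | norm_num [Int.toNat])

theorem gsc_loop_mod (test : Int) : gsc_loop test = gsc_loop (test % 32) := by
  unfold gsc_loop
  simp only [show PySem.List.pyRange 0 5 1 = [0, 1, 2, 3, 4] from rfl, List.foldl]
  rw [gsc_bit_congr test 0 (by omega) (by omega), gsc_bit_congr test 1 (by omega) (by omega),
      gsc_bit_congr test 2 (by omega) (by omega), gsc_bit_congr test 3 (by omega) (by omega),
      gsc_bit_congr test 4 (by omega) (by omega)]

theorem gsc_loop_small (r : Int) (h0 : 0 ≤ r) (h1 : r < 32) :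
    gsc_loop r = PySem.List.pyGetD gsc_table r (0, 0) := by
  interval_cases r <;> decide

theorem gsc_loop_eq_table (test : Int) :
    gsc_loop test = PySem.List.pyGetD gsc_table (PySem.Int.mod test 32) (0, 0) := by
  rw [gsc_loop_mod, PySem.Int.mod_eq_emod_of_pos (show (0:Int) < 32 by norm_num)]
  exact gsc_loop_small _ (Int.emod_nonneg _ (by norm_num)) (Int.emod_lt_of_pos _ (by norm_num))

-- B's copies of the constant tables are the same lists as A's
theorem gscB3_eq_arr3 : gscB_arr3 = gsc_arr3 := rfl
theorem gscB4_eq_arr4 : gscB_arr4 = gsc_arr4 := rfl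

-- ===== VERDICT (by name: the statement is the Claim_ definition above) =====
theorem gen_second_check_spec : Claim_equal_gen_second_check := by
  intro a1 i test _ _
  show gen_second_check a1 i test = gen_second_check_alt a1 i test
  simp only [gen_second_check, gen_second_check_alt, gscB3_eq_arr3, gscB4_eq_arr4,
             gsc_loop_eq_table]
  cases PySem.List.pyGet? gsc_arr3 (5 * a1 + i) <;>
    cases PySem.List.pyGet? gsc_arr4 (5 * a1 + i) <;> rfl
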